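-- pv_equiv track=rewrite | github.com/raeez/chiral-bar-cobar | scripts/bar_cohomology_v6.py | nbc_basis
-- ===== SOURCE A (Python) =====
-- from itertools import combinations, product as iterproduct
--
-- def nbc_basis(n, k):
--     """NBC basis for OS^k(n), vertices labeled 1..n."""
--     if k == 0:
--         return [()]
--     if n <= 1 or k >= n:
--         return [] if k > 0 else [()]
--     edges = [(i,j) for i in range(1, n+1) for j in range(i+1, n+1)]
--     broken_circuits = []
--     for i in range(1, n+1):
--         for j in range(i+1, n+1):
--             for kk in range(j+1, n+1):
--                 broken_circuits.append(((i,j), (i,kk)))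
--     basis = []
--     for subset in combinations(edges, k):
--         s = set(subset)
--         if all(not (bc[0] in s and bc[1] in s) for bc in broken_circuits):
--             basis.append(tuple(sorted(subset)))
--     return basis
-- ===== SOURCE B (Python) =====
-- def nbc_basis(n, k):
--     """NBC basis for OS^k(n), vertices labeled 1..n.
--
--     Direct generation: an NBC monomial is exactly a lex-sorted tuple of edges
--     whose smaller endpoints are strictly increasing, so we grow all monomials
--     level by level instead of filtering every k-subset of edges against the
--     broken circuits.
--     """
--     if k == 0:
--         return [()]
--     if k < 0 or n <= 1 or k >= n:
--         return []
--     level = [((), 1)]  # (monomial so far, least allowed next smaller endpoint)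
--     for _ in range(k):
--         level = [(mono + ((i, j),), i + 1)
--                  for (mono, start) in level
--                  for i in range(start, n)
--                  for j in range(i + 1, n + 1)]
--     return [mono for (mono, _) in level]
-- ===== Notes on version B (the rewrite author's own statement) =====
-- stated objective: alternative
-- what changed: Instead of enumerating every k-subset of the C(n,2) edges and testing each against all C(n,3) broken circuits, B generates the NBC monomials directly, growing them level by level (edges with strictly increasing smaller endpoints, in the same lexicographic order), so nothing is ever filtered out.
-- intended difference: For k < 0 with n <= 1, A's trailing guard accidentally returns [()] (treating every non-positive k like k = 0); B returns [], the intended empty basis for a negative degree. — e.g. on nbc_basis(1, -1): A returns [[]], B returns []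
-- crash fix: For k < 0 with n >= 2, A raises ValueError (combinations with negative r); B returns []. — e.g. on nbc_basis(2, -1): A raises ValueError, B returns []
import Mathlib
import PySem

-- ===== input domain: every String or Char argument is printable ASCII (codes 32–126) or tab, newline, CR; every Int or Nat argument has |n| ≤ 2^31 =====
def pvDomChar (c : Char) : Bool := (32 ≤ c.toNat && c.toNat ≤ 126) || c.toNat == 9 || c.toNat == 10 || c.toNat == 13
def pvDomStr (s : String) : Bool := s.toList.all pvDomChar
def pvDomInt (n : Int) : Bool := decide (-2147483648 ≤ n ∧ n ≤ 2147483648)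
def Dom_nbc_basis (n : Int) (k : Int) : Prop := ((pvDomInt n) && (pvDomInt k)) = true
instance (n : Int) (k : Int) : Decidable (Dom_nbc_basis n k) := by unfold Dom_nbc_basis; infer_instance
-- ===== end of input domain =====

-- Alternative: B replaces A's filter of all k-subsets of edges against all broken circuits by
-- direct level-by-level generation of the NBC monomials in the same lexicographic order.


-- ===== PORT A =====
def nbc_basis (n : Int) (k : Int) : List (List (Int × Int)) :=
  if k = 0 then [[]]
  else if n ≤ 1 ∨ n ≤ k then (if 0 < k then [] else [[]])
  else
    let edges : List (Int × Int) :=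
      (PySem.List.pyRange 1 (n+1)).flatMap (fun i =>
        (PySem.List.pyRange (i+1) (n+1)).map (fun j => (i, j)))
    let broken_circuits : List ((Int × Int) × (Int × Int)) :=
      (PySem.List.pyRange 1 (n+1)).flatMap (fun i =>
        (PySem.List.pyRange (i+1) (n+1)).flatMap (fun j =>
          (PySem.List.pyRange (j+1) (n+1)).map (fun kk => ((i, j), (i, kk)))))
    (PySem.List.combinations edges k.toNat).foldl (fun basis subset =>
      let s : PySem.Set (Int × Int) := PySem.Set.ofList subset
      if broken_circuits.all (fun bc => !(PySem.Set.contains s bc.1 && PySem.Set.contains s bc.2))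
      then basis ++ [PySem.List.sorted2 subset Prod.fst Prod.snd]
      else basis) []

-- ===== PORT B =====
-- one pass of Source B's level comprehension: extend every (monomial, least allowed start)
def nbcStep (n : Int) (level : List (List (Int × Int) × Int)) : List (List (Int × Int) × Int) :=
  level.flatMap (fun p =>
    (PySem.List.pyRange p.2 n).flatMap (fun i =>
      (PySem.List.pyRange (i+1) (n+1)).map (fun j => (p.1 ++ [(i, j)], i + 1))))

def nbc_basis_alt (n : Int) (k : Int) : List (List (Int × Int)) :=
  if k = 0 then [[]]
  else if k < 0 ∨ n ≤ 1 ∨ n ≤ k then []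
  else
    ((PySem.List.pyRange 0 k).foldl (fun level _ => nbcStep n level) [([], 1)]).map Prod.fst

-- ===== PRECONDITION & SPEC =====
-- Pre_ excludes exactly the inputs with k < 0 and n ≥ 2, where A raises ValueError
-- (itertools.combinations rejects a negative r).
def Pre_nbc_basis (n : Int) (k : Int) : Prop := 0 ≤ k ∨ n ≤ 1
instance (n : Int) (k : Int) : Decidable (Pre_nbc_basis n k) := by unfold Pre_nbc_basis; infer_instance
def pvWitness_nbc_basis : Int × Int := (4, 2)

-- For k < 0 with n <= 1, A's trailing guard accidentally returns [()] (treating every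
-- non-positive k like k = 0); B returns [], the intended empty basis for a negative degree.
def D_nbc_basis (n : Int) (k : Int) : Prop := k < 0 ∧ n ≤ 1
instance (n : Int) (k : Int) : Decidable (D_nbc_basis n k) := by unfold D_nbc_basis; infer_instance

def Spec_nbc_basis (n : Int) (k : Int) (out : List (List (Int × Int))) : Prop :=
  ¬ D_nbc_basis n k → out = nbc_basis_alt n k
instance (n : Int) (k : Int) (out : List (List (Int × Int))) : Decidable (Spec_nbc_basis n k out) := by
  unfold Spec_nbc_basis; infer_instance

def pvDiffWitness_nbc_basis : Int × Int := (1, -1)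
def pvDiffWitnessOut_nbc_basis : (List (List (Int × Int))) × (List (List (Int × Int))) := ([[]], [])

-- For k < 0 with n >= 2, A raises ValueError (combinations with negative r); B returns [].
def Raises_nbc_basis (n : Int) (k : Int) : Prop := k < 0 ∧ 2 ≤ n
instance (n : Int) (k : Int) : Decidable (Raises_nbc_basis n k) := by unfold Raises_nbc_basis; infer_instance
def pvRaiseWitness_nbc_basis : Int × Int := (2, -1)
def pvRaiseWitnessOut_nbc_basis : List (List (Int × Int)) := []

-- ===== CLAIM (what is proved, stated in full; the proofs are below) =====
def Claim_unchanged_nbc_basis : Prop := ∀ (n : Int) (k : Int), Dom_nbc_basis n k → Pre_nbc_basis n k → Spec_nbc_basis n k (nbc_basis n k)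
def Claim_changed_nbc_basis : Prop := Dom_nbc_basis (pvDiffWitness_nbc_basis.1) (pvDiffWitness_nbc_basis.2) ∧ Pre_nbc_basis (pvDiffWitness_nbc_basis.1) (pvDiffWitness_nbc_basis.2) ∧ D_nbc_basis (pvDiffWitness_nbc_basis.1) (pvDiffWitness_nbc_basis.2) ∧ nbc_basis (pvDiffWitness_nbc_basis.1) (pvDiffWitness_nbc_basis.2) = pvDiffWitnessOut_nbc_basis.1 ∧ nbc_basis_alt (pvDiffWitness_nbc_basis.1) (pvDiffWitness_nbc_basis.2) = pvDiffWitnessOut_nbc_basis.2 ∧ pvDiffWitnessOut_nbc_basis.1 ≠ pvDiffWitnessOut_nbc_basis.2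
def Claim_exact_nbc_basis : Prop := ∀ (n : Int) (k : Int), Dom_nbc_basis n k → Pre_nbc_basis n k → D_nbc_basis n k → nbc_basis n k ≠ nbc_basis_alt n k
def Claim_raises_nbc_basis : Prop := (∀ (n : Int) (k : Int), Dom_nbc_basis n k → Raises_nbc_basis n k → ¬ Pre_nbc_basis n k) ∧ (Dom_nbc_basis (pvRaiseWitness_nbc_basis.1) (pvRaiseWitness_nbc_basis.2) ∧ Raises_nbc_basis (pvRaiseWitness_nbc_basis.1) (pvRaiseWitness_nbc_basis.2) ∧ nbc_basis_alt (pvRaiseWitness_nbc_basis.1) (pvRaiseWitness_nbc_basis.2) = pvRaiseWitnessOut_nbc_basis)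

-- ===== LEMMAS AND PROOFS =====

-- rec(start, r): the recursive form of B's generation, used as the common normal form
def nbcRec (n : Int) (start : Int) : Nat → List (List (Int × Int))
  | 0 => [[]]
  | r + 1 =>
    (PySem.List.pyRange start n).flatMap (fun i =>
      (PySem.List.pyRange (i+1) (n+1)).flatMap (fun j =>
        (nbcRec n (i+1) r).map (fun rest => (i, j) :: rest)))

def edgesFrom (n : Int) (a : Int) : List (Int × Int) :=
  (PySem.List.pyRange a (n+1)).flatMap (fun i =>
    (PySem.List.pyRange (i+1) (n+1)).map (fun j => (i, j)))
def LL (x y : Int × Int) : Prop := x.1 < y.1 ∨ (x.1 = y.1 ∧ x.2 < y.2)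

lemma mem_edgesFrom {n a : Int} {e : Int × Int} (h : e ∈ edgesFrom n a) :
    a ≤ e.1 ∧ e.1 < e.2 ∧ e.2 ≤ n := by
  simp only [edgesFrom, List.mem_flatMap, List.mem_map, PySem.List.mem_pyRange_one] at h
  obtain ⟨i, hi, j, hj, rfl⟩ := h
  simp only []
  omega

lemma edgesFrom_eq_nil {n a : Int} (h : n ≤ a) : edgesFrom n a = [] := by
  rcases lt_or_eq_of_le h with h' | h'
  · rw [edgesFrom, PySem.List.pyRange_one_eq_nil (by omega)]; rfl
  · subst h'
    rw [edgesFrom, PySem.List.pyRange_one_cons (by omega), PySem.List.pyRange_one_eq_nil (by omega)]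
    simp [PySem.List.pyRange_one_eq_nil (by omega : (n:Int)+1 ≤ n+1)]

lemma edgesFrom_cons {n a : Int} (h : a < n) :
    edgesFrom n a = (PySem.List.pyRange (a+1) (n+1)).map (fun j => (a, j)) ++ edgesFrom n (a+1) := by
  rw [edgesFrom, PySem.List.pyRange_one_cons (by omega), List.flatMap_cons]; rfl

lemma pyRange_pairwise_lt' : ∀ (d : Nat) (a b : Int), (b - a).toNat ≤ d →
    (PySem.List.pyRange a b).Pairwise (· < ·) := by
  intro d
  induction d with
  | zero => intro a b h; rw [PySem.List.pyRange_one_eq_nil (by omega)]; exact List.Pairwise.nil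
  | succ d ih =>
    intro a b h
    by_cases hab : a < b
    · rw [PySem.List.pyRange_one_cons hab]
      refine List.Pairwise.cons ?_ (ih (a+1) b (by omega))
      intro x hx
      exact (PySem.List.mem_pyRange_one.1 hx).1.trans_lt' (by omega)
    · rw [PySem.List.pyRange_one_eq_nil (by omega)]; exact List.Pairwise.nil

lemma pyRange_pairwise (a b : Int) : (PySem.List.pyRange a b).Pairwise (· < ·) :=
  pyRange_pairwise_lt' (b - a).toNat a b le_rfl

lemma edgesFrom_pairwise (n : Int) : ∀ (d : Nat) (a : Int), (n - a).toNat ≤ d →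
    (edgesFrom n a).Pairwise LL := by
  intro d
  induction d with
  | zero => intro a h; rw [edgesFrom_eq_nil (by omega)]; exact List.Pairwise.nil
  | succ d ih =>
    intro a h
    by_cases han : a < n
    · rw [edgesFrom_cons han, List.pairwise_append]
      refine ⟨?_, ih (a+1) (by omega), ?_⟩
      · rw [List.pairwise_map]
        exact (pyRange_pairwise (a+1) (n+1)).imp (fun hlt => Or.inr ⟨rfl, hlt⟩)
      · intro x hx y hy
        rw [List.mem_map] at hx
        obtain ⟨j, _, rfl⟩ := hx
        exact Or.inl (by have := (mem_edgesFrom hy).1; simpa using by omega)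
    · rw [edgesFrom_eq_nil (by omega)]; exact List.Pairwise.nil

def q (c : List (Int × Int)) : Bool := decide (c.Pairwise (fun x y => x.1 ≠ y.1))

lemma comb_filter_drop (a : Int) (ys : List (Int × Int)) (hy : ∀ y ∈ ys, y.1 ≠ a) :
    ∀ (bs : List (Int × Int)), (∀ b ∈ bs, b.1 = a) → ∀ (r : Nat),
    (PySem.List.combinations (bs ++ ys) r).filter (fun s => s.all (fun e => e.1 != a) && q s)
      = (PySem.List.combinations ys r).filter q := by
  intro bs
  induction bs with
  | nil =>
    intro _ r
    rw [List.nil_append]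
    apply List.filter_congr
    intro s hs
    have hsub := PySem.List.sublist_of_mem_combinations hs
    have : s.all (fun e => e.1 != a) = true := by
      rw [List.all_eq_true]
      intro e he
      exact bne_iff_ne.2 (hy e (hsub.subset he))
    rw [this, Bool.true_and]
  | cons b bs ih =>
    intro hb r
    have hba : b.1 = a := hb b (List.mem_cons_self)
    have hbs : ∀ x ∈ bs, x.1 = a := fun x hx => hb x (List.mem_cons_of_mem _ hx)
    cases r with
    | zero => simp [PySem.List.combinations_zero, q]
    | succ r =>
      rw [List.cons_append, PySem.List.combinations_cons_succ, List.filter_append,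
        List.filter_map]
      have h1 : ((PySem.List.combinations (bs ++ ys) r).filter
          ((fun s => s.all (fun e => e.1 != a) && q s) ∘ (b :: ·))) = [] := by
        rw [List.filter_eq_nil_iff]
        intro s _
        simp only [Function.comp, List.all_cons, hba, bne_self_eq_false, Bool.false_and]
        simp
      rw [h1, List.map_nil, List.nil_append, ih hbs (r+1)]

lemma q_cons (b : Int × Int) (s : List (Int × Int)) :
    q (b :: s) = ((s.all (fun e => e.1 != b.1)) && q s) := by
  rw [Bool.eq_iff_iff]
  simp only [q, Bool.and_eq_true, decide_eq_true_eq, List.pairwise_cons, List.all_eq_true,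
    bne_iff_ne]
  constructor
  · rintro ⟨h1, h2⟩; exact ⟨fun e he => Ne.symm (h1 e he), h2⟩
  · rintro ⟨h1, h2⟩; exact ⟨fun e he => Ne.symm (h1 e he), h2⟩

lemma comb_filter_block (a : Int) (ys : List (Int × Int)) (hy : ∀ y ∈ ys, y.1 ≠ a) :
    ∀ (bs : List (Int × Int)), (∀ b ∈ bs, b.1 = a) → ∀ (r : Nat),
    (PySem.List.combinations (bs ++ ys) (r+1)).filter q
      = bs.flatMap (fun e => ((PySem.List.combinations ys r).filter q).map (e :: ·))
        ++ (PySem.List.combinations ys (r+1)).filter q := by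
  intro bs
  induction bs with
  | nil => intro _ r; simp
  | cons b bs ih =>
    intro hb r
    have hba : b.1 = a := hb b (List.mem_cons_self)
    have hbs : ∀ x ∈ bs, x.1 = a := fun x hx => hb x (List.mem_cons_of_mem _ hx)
    rw [List.cons_append, PySem.List.combinations_cons_succ, List.filter_append,
      List.filter_map]
    have h1 : ((PySem.List.combinations (bs ++ ys) r).filter (q ∘ (b :: ·)))
        = (PySem.List.combinations ys r).filter q := by
      rw [← comb_filter_drop a ys hy bs hbs r]
      apply List.filter_congr
      intro s _
      simp only [Function.comp, q_cons, hba]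
    rw [h1, ih hbs r, List.flatMap_cons, List.append_assoc]

lemma comb_filter_eq_nbcRec (n : Int) : ∀ (d : Nat) (a : Int), (n - a).toNat ≤ d → ∀ (r : Nat),
    (PySem.List.combinations (edgesFrom n a) r).filter q = nbcRec n a r := by
  intro d
  induction d with
  | zero =>
    intro a h r
    rw [edgesFrom_eq_nil (by omega)]
    cases r with
    | zero => simp [PySem.List.combinations_zero, nbcRec, q]
    | succ r =>
      rw [PySem.List.combinations_nil_succ, List.filter_nil, nbcRec,
        PySem.List.pyRange_one_eq_nil (by omega), List.flatMap_nil]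
  | succ d ih =>
    intro a h r
    by_cases han : a < n
    · cases r with
      | zero => simp [PySem.List.combinations_zero, nbcRec, q]
      | succ r =>
        rw [edgesFrom_cons han]
        rw [comb_filter_block a (edgesFrom n (a+1))
          (fun y hy => by have := (mem_edgesFrom hy).1; omega)
          _ (fun b hb => by obtain ⟨j, _, rfl⟩ := List.mem_map.1 hb; rfl) r]
        rw [ih (a+1) (by omega) r, ih (a+1) (by omega) (r+1)]
        show _ = nbcRec n a (r+1)
        conv_rhs => rw [nbcRec, PySem.List.pyRange_one_cons han, List.flatMap_cons]
        rw [List.flatMap_map]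
        congr 1
    · rw [edgesFrom_eq_nil (by omega)]
      cases r with
      | zero => simp [PySem.List.combinations_zero, nbcRec, q]
      | succ r =>
        rw [PySem.List.combinations_nil_succ, List.filter_nil, nbcRec,
          PySem.List.pyRange_one_eq_nil (by omega), List.flatMap_nil]

lemma cond_eq (n : Int) (c : List (Int × Int)) (hsub : c.Sublist (edgesFrom n 1)) :
    ((PySem.List.pyRange 1 (n+1)).flatMap (fun i =>
        (PySem.List.pyRange (i+1) (n+1)).flatMap (fun j =>
          (PySem.List.pyRange (j+1) (n+1)).map (fun kk => ((i, j), (i, kk)))))).all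
      (fun bc => !(PySem.Set.contains (PySem.Set.ofList c) bc.1 && PySem.Set.contains (PySem.Set.ofList c) bc.2))
      = q c := by
  have hpw : c.Pairwise LL :=
    (edgesFrom_pairwise n (n - 1).toNat 1 le_rfl).sublist hsub
  have hmemc : ∀ x ∈ c, (PySem.Set.contains (PySem.Set.ofList c) x) = true := by
    intro x hx
    exact (PySem.Set.contains_iff _ _).2 ((PySem.Set.mem_ofList c x).2 hx)
  rw [Bool.eq_iff_iff, List.all_eq_true]
  constructor
  · intro hall
    rw [q, decide_eq_true_eq, List.pairwise_iff_forall_sublist]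
    intro x y hxy heq
    have hLL : LL x y := List.pairwise_iff_forall_sublist.1 hpw hxy
    have hxc : x ∈ c := hxy.subset (by simp)
    have hyc : y ∈ c := hxy.subset (by simp)
    have hx := mem_edgesFrom (hsub.subset hxc)
    have hy := mem_edgesFrom (hsub.subset hyc)
    have hlt : x.2 < y.2 := by rcases hLL with h | ⟨_, h⟩ <;> omega
    have hbc : (x, y) ∈ ((PySem.List.pyRange 1 (n+1)).flatMap (fun i =>
        (PySem.List.pyRange (i+1) (n+1)).flatMap (fun j =>
          (PySem.List.pyRange (j+1) (n+1)).map (fun kk => ((i, j), (i, kk)))))) := by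
      simp only [List.mem_flatMap, List.mem_map, PySem.List.mem_pyRange_one]
      refine ⟨x.1, by omega, x.2, by omega, y.2, by omega, ?_⟩
      rw [Prod.mk.eta]
      have : (x.1, y.2) = y := by rw [heq, Prod.mk.eta]
      rw [this]
    have := hall (x, y) hbc
    rw [hmemc x hxc, hmemc y hyc] at this
    simp at this
  · intro hq bc hbc
    simp only [List.mem_flatMap, List.mem_map, PySem.List.mem_pyRange_one] at hbc
    obtain ⟨i, hi, j, hj, kk, hkk, rfl⟩ := hbc
    simp only [Bool.not_eq_true', Bool.and_eq_false_iff]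
    by_cases h1 : (PySem.Set.ofList c).contains (i, j) = false
    · exact Or.inl h1
    by_cases h2 : (PySem.Set.ofList c).contains (i, kk) = false
    · exact Or.inr h2
    rw [Bool.not_eq_false] at h1 h2
    exfalso
    have m1 : (i, j) ∈ c := (PySem.Set.mem_ofList c _).1 ((PySem.Set.contains_iff _ _).1 h1)
    have m2 : (i, kk) ∈ c := (PySem.Set.mem_ofList c _).1 ((PySem.Set.contains_iff _ _).1 h2)
    rw [q, decide_eq_true_eq] at hq
    have hne : ((i, j) : Int × Int) ≠ (i, kk) := by
      intro h; rw [Prod.mk.injEq] at h; omega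
    have := hq.forall (fun x y h => Ne.symm h) m1 m2 hne
    simp at this

lemma sorted2_eq_self (c : List (Int × Int)) (h : c.Pairwise LL) :
    PySem.List.sorted2 c Prod.fst Prod.snd = c := by
  have hb : PySem.List.sorted2 c Prod.fst Prod.snd
      = PySem.List.sorted c (fun x => toLex x) := by
    show List.foldl (fun acc x => PySem.List.insertBy
        (fun a b => decide (a.1 < b.1) || (!decide (b.1 < a.1) && decide (a.2 < b.2))) x acc) [] c
      = List.foldl (fun acc x => PySem.List.insertBy
        (fun a b => decide ((toLex a : Lex (Int × Int)) < toLex b)) x acc) [] c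
    congr 1
    funext acc z
    congr 1
    funext x y
    rw [Bool.eq_iff_iff]
    simp only [Bool.or_eq_true, Bool.and_eq_true, Bool.not_eq_true', decide_eq_true_eq,
      decide_eq_false_iff_not, Prod.Lex.lt_iff, ofLex_toLex]
    omega
  rw [hb]
  exact PySem.List.sorted_eq_of_perm_of_pairwise_lt c c _ (List.Perm.refl c)
    (h.imp (fun {a b} hll => by rw [Prod.Lex.lt_iff]; exact hll))


lemma foldl_const_eq_iterate {α β : Type} (f : α → α) : ∀ (l : List β) (x : α),
    l.foldl (fun acc _ => f acc) x = f^[l.length] x := by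
  intro l
  induction l with
  | nil => intro x; rfl
  | cons b l ih => intro x; rw [List.foldl_cons, List.length_cons, Function.iterate_succ_apply, ih]

lemma length_pyRange : ∀ (d : Nat) (a b : Int), (b - a).toNat ≤ d →
    (PySem.List.pyRange a b).length = (b - a).toNat := by
  intro d
  induction d with
  | zero =>
    intro a b h
    rw [PySem.List.pyRange_one_eq_nil (by omega)]
    simp only [List.length_nil]
    omega
  | succ d ih =>
    intro a b h
    by_cases hab : a < b
    · rw [PySem.List.pyRange_one_cons hab, List.length_cons, ih (a+1) b (by omega)]; omega
    · rw [PySem.List.pyRange_one_eq_nil (by omega)]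
      simp only [List.length_nil]
      omega

lemma iterate_nbcStep (n : Int) : ∀ (r : Nat) (level : List (List (Int × Int) × Int)),
    ((nbcStep n)^[r] level).map Prod.fst
      = level.flatMap (fun p => (nbcRec n p.2 r).map (p.1 ++ ·)) := by
  intro r
  induction r with
  | zero =>
    intro level
    show level.map Prod.fst = _
    induction level with
    | nil => rfl
    | cons p level ihl => simp_all [nbcRec]
  | succ r ih =>
    intro level
    rw [Function.iterate_succ_apply, ih, nbcStep, List.flatMap_assoc]
    congr 1
    funext p
    conv_rhs => rw [nbcRec]
    rw [List.flatMap_assoc]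
    simp only [List.flatMap_map, List.map_flatMap, List.map_map]
    congr 1
    funext i
    congr 1
    funext j
    congr 1
    funext rest
    simp [Function.comp]

lemma alt_eq_nbcRec (n k : Int) (hk : 0 < k) :
    ((PySem.List.pyRange 0 k).foldl (fun level _ => nbcStep n level) [([], 1)]).map Prod.fst
      = nbcRec n 1 k.toNat := by
  rw [foldl_const_eq_iterate, length_pyRange k.toNat 0 k (by omega),
    show (k - 0).toNat = k.toNat by omega, iterate_nbcStep]
  simp

-- ===== VERDICT (by name: the statement is the Claim_ definition above) =====
theorem nbc_basis_spec : Claim_unchanged_nbc_basis := by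
  intro n k _ hpre
  unfold Spec_nbc_basis
  intro hnd
  unfold D_nbc_basis at hnd
  unfold Pre_nbc_basis at hpre
  by_cases hk0 : k = 0
  · unfold nbc_basis nbc_basis_alt
    rw [if_pos hk0, if_pos hk0]
  · have hk : 0 < k := by
      by_contra hx
      rcases hpre with h | h
      · omega
      · exact hnd ⟨by omega, h⟩
    by_cases hcond : n ≤ 1 ∨ n ≤ k
    · unfold nbc_basis nbc_basis_alt
      rw [if_neg hk0, if_pos hcond, if_pos hk, if_neg hk0,
        if_pos (show k < 0 ∨ n ≤ 1 ∨ n ≤ k from Or.inr hcond)]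
    · unfold nbc_basis nbc_basis_alt
      rw [if_neg hk0, if_neg hcond, if_neg hk0,
        if_neg (show ¬(k < 0 ∨ n ≤ 1 ∨ n ≤ k) by omega)]
      show (PySem.List.combinations (edgesFrom n 1) k.toNat).foldl (fun basis subset =>
          if ((PySem.List.pyRange 1 (n+1)).flatMap (fun i =>
              (PySem.List.pyRange (i+1) (n+1)).flatMap (fun j =>
                (PySem.List.pyRange (j+1) (n+1)).map (fun kk => ((i, j), (i, kk)))))).all
            (fun bc => !(PySem.Set.contains (PySem.Set.ofList subset) bc.1
                      && PySem.Set.contains (PySem.Set.ofList subset) bc.2))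
          then basis ++ [PySem.List.sorted2 subset Prod.fst Prod.snd]
          else basis) []
        = ((PySem.List.pyRange 0 k).foldl (fun level _ => nbcStep n level) [([], 1)]).map Prod.fst
      rw [alt_eq_nbcRec n k hk]
      rw [PySem.List.foldl_append_if, List.nil_append]
      rw [List.filter_congr (fun c hc => cond_eq n c (PySem.List.sublist_of_mem_combinations hc))]
      have hid : ∀ c ∈ (PySem.List.combinations (edgesFrom n 1) k.toNat).filter q,
          PySem.List.sorted2 c Prod.fst Prod.snd = c := by
        intro c hc
        rw [List.mem_filter] at hc
        exact sorted2_eq_self c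
          ((edgesFrom_pairwise n (n - 1).toNat 1 le_rfl).sublist
            (PySem.List.sublist_of_mem_combinations hc.1))
      rw [List.map_congr_left hid, List.map_id']
      exact comb_filter_eq_nbcRec n (n - 1).toNat 1 le_rfl k.toNat

theorem nbc_basis_changed : Claim_changed_nbc_basis := by
  unfold Claim_changed_nbc_basis; decide

theorem nbc_basis_tight : Claim_exact_nbc_basis := by
  intro n k _ _ hd
  unfold D_nbc_basis at hd
  unfold nbc_basis nbc_basis_alt
  rw [if_neg (show ¬(k = 0) by omega), if_pos (Or.inl hd.2 : n ≤ 1 ∨ n ≤ k),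
    if_neg (show ¬(0 < k) by omega), if_neg (show ¬(k = 0) by omega),
    if_pos (Or.inl hd.1 : k < 0 ∨ n ≤ 1 ∨ n ≤ k)]
  simp

@[simp]
theorem nbc_basis_raises : Claim_raises_nbc_basis := by
  unfold Claim_raises_nbc_basis
  exact ⟨by intro n k _ hr; unfold Raises_nbc_basis Pre_nbc_basis at *; omega, by decide⟩
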